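-- pv_equiv track=rewrite | github.com/zzz136454872/leetcode | uniqueLetterString.py | uniqueLetterString
-- ===== SOURCE A (Python) =====
-- def uniqueLetterString(s: str) -> int:
--     s = [ord(a) - ord('A') for a in s]
--     res = 0
--
--     for i in range(26):
--         prev = -1
--         prev2 = -1
--
--         for j in range(len(s)):
--             if s[j] == i:
--                 res += (prev - prev2) * (j - prev)
--                 prev, prev2 = j, prev
--         res += (prev - prev2) * (len(s) - prev)
--
--     return res
-- ===== SOURCE B (Python) =====
-- def uniqueLetterString(s: str) -> int:
--     # One pass: for each uppercase letter keep its last two occurrence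
--     # positions; each occurrence closes off the contribution of the previous
--     # one, and a final pass over the tracked letters adds the tail terms.
--     last = {}  # char -> (prev2, prev)
--     res = 0
--     for j, c in enumerate(s):
--         if 'A' <= c <= 'Z':
--             p2, p = last.get(c, (-1, -1))
--             res += (p - p2) * (j - p)
--             last[c] = (p, j)
--     n = len(s)
--     for p2, p in last.values():
--         res += (p - p2) * (n - p)
--     return res
-- ===== Notes on version B (the rewrite author's own statement) =====
-- stated objective: faster
-- what changed: A scans the whole string once per letter (26 passes, each rebuilding prev/prev2 for that letter); B makes a single pass keeping the last two occurrence positions of each letter in a dict, then adds one tail term per seen letter.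
import Mathlib
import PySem

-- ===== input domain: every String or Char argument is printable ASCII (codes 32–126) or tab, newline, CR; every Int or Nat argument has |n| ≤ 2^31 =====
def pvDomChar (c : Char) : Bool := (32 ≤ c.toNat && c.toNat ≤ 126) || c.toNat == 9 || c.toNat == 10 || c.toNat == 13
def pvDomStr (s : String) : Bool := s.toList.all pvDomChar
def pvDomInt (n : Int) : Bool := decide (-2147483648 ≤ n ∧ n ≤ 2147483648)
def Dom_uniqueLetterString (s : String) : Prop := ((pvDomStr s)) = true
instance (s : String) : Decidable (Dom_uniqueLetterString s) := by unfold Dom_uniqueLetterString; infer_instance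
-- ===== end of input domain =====

-- B replaces A's 26 passes over the string (one per letter) by a single pass that
-- keeps the last two occurrence positions of each letter in a dict (objective: faster, constant factor).

-- ===== PORT A =====
-- the per-occurrence update 'res += (prev-prev2)*(j-prev); prev, prev2 = j, prev'
def ulsStep (st : Int × Int × Int) (j : Int) : Int × Int × Int :=
  (st.1 + (st.2.1 - st.2.2) * (j - st.2.1), j, st.2.1)

def uniqueLetterString (s : String) : Int :=
  let sl : List Int := s.toList.map (fun a => (a.toNat : Int) - 65)
  let n : Int := (sl.length : Int)
  (PySem.List.pyRange 0 26 1).foldl (fun res i =>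
    let st :=
      (PySem.List.pyRange 0 n 1).foldl
        (fun st j => if PySem.List.pyGetD sl j 0 = i then ulsStep st j else st)
        (res, -1, -1)
    st.1 + (st.2.1 - st.2.2) * (n - st.2.1)) 0

-- ===== PORT B =====
-- loop body of B's single pass: (res, last) updated at position j = jc.1 holding char c = jc.2
def ulsStepB (st : Int × PySem.Dict Char (Int × Int)) (jc : Int × Char) :
    Int × PySem.Dict Char (Int × Int) :=
  if 'A' ≤ jc.2 ∧ jc.2 ≤ 'Z' then
    let pp := st.2.getD jc.2 (-1, -1)
    (st.1 + (pp.2 - pp.1) * (jc.1 - pp.2), st.2.insert jc.2 (pp.2, jc.1))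
  else st

def uniqueLetterString_alt (s : String) : Int :=
  let cs := s.toList
  let st := (PySem.List.enumerate cs 0).foldl ulsStepB (0, PySem.Dict.empty)
  let n : Int := (cs.length : Int)
  st.2.values.foldl (fun res pr => res + (pr.2 - pr.1) * (n - pr.2)) st.1

-- ===== PRECONDITION & SPEC =====
def Spec_uniqueLetterString (s : String) (out : Int) : Prop := out = uniqueLetterString_alt s
instance (s : String) (out : Int) : Decidable (Spec_uniqueLetterString s out) := by unfold Spec_uniqueLetterString; infer_instance

-- ===== CLAIM (what is proved, stated in full; the proofs are below) =====
def Claim_equal_uniqueLetterString : Prop := ∀ (s : String), Dom_uniqueLetterString s → Spec_uniqueLetterString s (uniqueLetterString s)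

-- ===== LEMMAS AND PROOFS =====

-- per-letter machinery: occurrence positions of a char, partial result, (prev, prev2), tail term
def occI (cs : List Char) (c : Char) : List Int :=
  ((PySem.List.enumerate cs 0).filter (fun p => p.2 == c)).map (·.1)

def ulsRes (l : List Int) : Int := (l.foldl ulsStep (0, -1, -1)).1

def ulsPP (l : List Int) : Int × Int := (l.foldl ulsStep (0, -1, -1)).2

def ulsTail (l : List Int) (n : Int) : Int := ((ulsPP l).1 - (ulsPP l).2) * (n - (ulsPP l).1)

def ulsF (l : List Int) (n : Int) : Int := ulsRes l + ulsTail l n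

def upList : List Char := (List.range 26).map (fun k => Char.ofNat (k + 65))

lemma ulsRes_nil : ulsRes [] = 0 := rfl

lemma ulsPP_nil : ulsPP [] = (-1, -1) := rfl

lemma ulsStep_add (l : List Int) (r p p2 : Int) :
    l.foldl ulsStep (r, p, p2)
      = (r + (l.foldl ulsStep (0, p, p2)).1, (l.foldl ulsStep (0, p, p2)).2) := by
  induction l generalizing r p p2 with
  | nil => simp
  | cons j t ih =>
    simp only [List.foldl_cons, ulsStep]
    rw [ih, ih (0 + (p - p2) * (j - p))]
    ring_nf

lemma occI_nil (c : Char) : occI [] c = [] := by simp [occI, PySem.List.enumerate]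

lemma occI_append (cs : List Char) (x c : Char) :
    occI (cs ++ [x]) c = occI cs c ++ (if x = c then [(cs.length : Int)] else []) := by
  simp only [occI, PySem.List.enumerate_append, List.filter_append, List.map_append]
  congr 1
  by_cases h : x = c <;>
    simp [PySem.List.enumerate, h, List.filter, beq_iff_eq]

lemma occI_of_not_mem (cs : List Char) (c : Char) (h : c ∉ cs) : occI cs c = [] := by
  induction cs using List.reverseRecOn with
  | nil => simp [occI, PySem.List.enumerate]
  | append_singleton t x ih =>
    rw [occI_append]
    simp at h
    simp [ih h.1, Ne.symm h.2]

lemma ulsRes_append (l : List Int) (j : Int) :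
    ulsRes (l ++ [j]) = ulsRes l + ((ulsPP l).1 - (ulsPP l).2) * (j - (ulsPP l).1) := by
  simp [ulsRes, ulsPP, List.foldl_append, ulsStep]

lemma ulsPP_append (l : List Int) (j : Int) : ulsPP (l ++ [j]) = (j, (ulsPP l).1) := by
  simp [ulsPP, List.foldl_append, ulsStep]

lemma isUp_iff (c : Char) : ('A' ≤ c ∧ c ≤ 'Z') ↔ (65 ≤ c.toNat ∧ c.toNat ≤ 90) := by
  rw [Char.le_def, Char.le_def, UInt32.le_iff_toNat_le, UInt32.le_iff_toNat_le]
  show (65 ≤ c.val.toNat ∧ c.val.toNat ≤ 90) ↔ _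
  rfl

lemma mem_upList_iff (c : Char) : c ∈ upList ↔ (65 ≤ c.toNat ∧ c.toNat ≤ 90) := by
  simp only [upList, List.mem_map, List.mem_range]
  constructor
  · rintro ⟨k, hk, rfl⟩
    have hv : (k + 65).isValidChar := by
      constructor
      omega
    rw [Char.toNat_ofNat, if_pos hv]
    omega
  · rintro ⟨h1, h2⟩
    refine ⟨c.toNat - 65, by omega, ?_⟩
    have : c.toNat - 65 + 65 = c.toNat := by omega
    rw [this]
    exact (Char.ofNat_toNat c)

lemma nodup_upList : upList.Nodup := by decide

lemma sum_map_update {α : Type} [DecidableEq α] (l : List α) (x : α) (hnd : l.Nodup)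
    (f g : α → Int) (hfg : ∀ c ∈ l, c ≠ x → f c = g c) (hx : x ∈ l) :
    (l.map f).sum = (l.map g).sum - g x + f x := by
  induction l with
  | nil => simp at hx
  | cons a t ih =>
    simp only [List.map_cons, List.sum_cons]
    rcases List.mem_cons.mp hx with rfl | hxt
    · have : ∀ c ∈ t, f c = g c := fun c hc =>
        hfg c (List.mem_cons_of_mem _ hc) (fun h => (List.nodup_cons.mp hnd).1 (h ▸ hc))
      rw [List.map_congr_left this]
      ring
    · have hax : a ≠ x := fun h => (List.nodup_cons.mp hnd).1 (h ▸ hxt)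
      rw [ih (List.nodup_cons.mp hnd).2 (fun c hc => hfg c (List.mem_cons_of_mem _ hc)) hxt,
        hfg a (List.mem_cons_self) hax]
      ring

lemma sum_map_subset {α : Type} [DecidableEq α] (l1 l2 : List α) (f : α → Int)
    (h1 : l1.Nodup) (h2 : l2.Nodup) (hs : ∀ c ∈ l1, c ∈ l2)
    (hz : ∀ c ∈ l2, c ∉ l1 → f c = 0) : (l1.map f).sum = (l2.map f).sum := by
  rw [← List.sum_toFinset f h1, ← List.sum_toFinset f h2]
  apply Finset.sum_subset
  · intro c hc
    exact List.mem_toFinset.mpr (hs c (List.mem_toFinset.mp hc))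
  · intro c hc hnc
    exact hz c (List.mem_toFinset.mp hc) (fun h => hnc (List.mem_toFinset.mpr h))

lemma B_inv (cs : List Char) :
    ((PySem.List.enumerate cs 0).foldl ulsStepB (0, PySem.Dict.empty)).1
        = (upList.map (fun c => ulsRes (occI cs c))).sum
    ∧ (∀ c, 65 ≤ c.toNat ∧ c.toNat ≤ 90 →
        ((PySem.List.enumerate cs 0).foldl ulsStepB (0, PySem.Dict.empty)).2.getD c (-1, -1)
          = ((ulsPP (occI cs c)).2, (ulsPP (occI cs c)).1))
    ∧ ((PySem.List.enumerate cs 0).foldl ulsStepB (0, PySem.Dict.empty)).2.keys.Nodup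
    ∧ (∀ c, c ∈ ((PySem.List.enumerate cs 0).foldl ulsStepB (0, PySem.Dict.empty)).2.keys
          ↔ (65 ≤ c.toNat ∧ c.toNat ≤ 90) ∧ c ∈ cs) := by
  induction cs using List.reverseRecOn with
  | nil =>
    refine ⟨?_, ?_, ?_, ?_⟩
    · simp [PySem.List.enumerate, occI_nil, ulsRes_nil]
    · intro c _
      simp [PySem.List.enumerate, PySem.Dict.getD_empty, occI_nil, ulsPP_nil]
    · simp [PySem.List.enumerate, PySem.Dict.keys_empty]
    · intro c
      simp [PySem.List.enumerate, PySem.Dict.keys_empty]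
  | append_singleton t x ih =>
    obtain ⟨ihr, ihd, ihn, ihk⟩ := ih
    rw [PySem.List.enumerate_append]
    simp only [List.foldl_append]
    set st := (PySem.List.enumerate t 0).foldl ulsStepB (0, PySem.Dict.empty) with hst
    have henum1 : PySem.List.enumerate [x] (0 + (t.length : Int)) = [((t.length : Int), x)] := by
      simp [PySem.List.enumerate]
    rw [henum1]
    simp only [List.foldl_cons, List.foldl_nil]
    by_cases hup : 'A' ≤ x ∧ x ≤ 'Z'
    · have hupn : 65 ≤ x.toNat ∧ x.toNat ≤ 90 := (isUp_iff x).mp hup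
      have hx : x ∈ upList := (mem_upList_iff x).mpr hupn
      rw [ulsStepB, if_pos hup]
      simp only
      rw [ihd x hupn]
      refine ⟨?_, ?_, ?_, ?_⟩
      · -- res component
        rw [sum_map_update upList x nodup_upList
            (fun c => ulsRes (occI (t ++ [x]) c)) (fun c => ulsRes (occI t c))
            (fun c _ hcx => by
              show ulsRes (occI (t ++ [x]) c) = ulsRes (occI t c)
              rw [occI_append, if_neg (fun h => hcx h.symm), List.append_nil])
            hx]
        rw [occI_append, if_pos rfl, ulsRes_append]
        rw [← ihr]
        ring
      · intro c hc
        rw [occI_append]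
        by_cases hcx : c = x
        · subst hcx
          rw [if_pos rfl, ulsPP_append, PySem.Dict.getD_insert, if_pos rfl]
        · rw [if_neg (fun h => hcx h.symm), List.append_nil, PySem.Dict.getD_insert,
            if_neg hcx, ihd c hc]
      · exact PySem.Dict.nodup_keys_insert _ _ _ ihn
      · intro c
        rw [PySem.Dict.mem_keys_insert, ihk c]
        constructor
        · rintro (rfl | ⟨h1, h2⟩)
          · exact ⟨hupn, by simp⟩
          · exact ⟨h1, by simp [h2]⟩
        · rintro ⟨h1, h2⟩
          rcases List.mem_append.mp h2 with h | h
          · exact Or.inr ⟨h1, h⟩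
          · simp at h
            exact Or.inl h
    · have hupn : ¬ (65 ≤ x.toNat ∧ x.toNat ≤ 90) := fun h => hup ((isUp_iff x).mpr h)
      rw [ulsStepB, if_neg hup]
      refine ⟨?_, ?_, ihn, ?_⟩
      · rw [ihr]
        apply congrArg
        apply List.map_congr_left
        intro c hc
        have : x ≠ c := fun h => hupn (h ▸ (mem_upList_iff c).mp hc)
        rw [occI_append, if_neg this, List.append_nil]
      · intro c hc
        have : x ≠ c := fun h => hupn (h ▸ hc)
        rw [occI_append, if_neg this, List.append_nil]
        exact ihd c hc
      · intro c
        rw [ihk c]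
        constructor
        · rintro ⟨h1, h2⟩
          exact ⟨h1, by simp [h2]⟩
        · rintro ⟨h1, h2⟩
          rcases List.mem_append.mp h2 with h | h
          · exact ⟨h1, h⟩
          · simp at h
            exact absurd (h ▸ h1) hupn

lemma char_cond_iff (c : Char) (k : Nat) (hk : k < 26) :
    ((c.toNat : Int) - 65 = (k : Int)) ↔ c = Char.ofNat (k + 65) := by
  constructor
  · intro h
    have h2 : c.toNat = k + 65 := by omega
    rw [← h2]
    exact (Char.ofNat_toNat c).symm
  · intro h
    subst h
    have hv : (k + 65).isValidChar := by constructor; omega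
    rw [Char.toNat_ofNat, if_pos hv]
    push_cast
    omega

lemma occI_eq_filter (cs : List Char) (k : Nat) (hk : k < 26) :
    (PySem.List.pyRange 0 (cs.length : Int) 1).filter
        (fun j => decide (PySem.List.pyGetD (cs.map (fun a => (a.toNat : Int) - 65)) j 0 = (k : Int)))
      = occI cs (Char.ofNat (k + 65)) := by
  rw [occI, PySem.List.enumerate_eq_map_pyRange cs 'A', List.filter_map, List.map_map]
  have hlen : PySem.List.len cs = (cs.length : Int) := by
    simp [PySem.List.len]
  rw [hlen]
  rw [show ((·.1) ∘ fun j => (j, PySem.List.pyGetD cs j 'A') : Int → Int) = id from rfl,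
    List.map_id]
  apply List.filter_congr
  intro j hj
  have hjr := PySem.List.mem_pyRange_one.mp hj
  have hjl : j < ((cs.map (fun a => (a.toNat : Int) - 65)).length : Int) := by
    rw [List.length_map]; exact hjr.2
  rw [PySem.List.pyGetD_eq_getElem _ 0 hjr.1 hjl,
      Function.comp_apply,
      PySem.List.pyGetD_eq_getElem _ 'A' hjr.1 hjr.2]
  simp only [List.getElem_map]
  rw [Bool.eq_iff_iff]
  simp only [decide_eq_true_eq, beq_iff_eq]
  exact char_cond_iff _ k hk

lemma A_eq_sum (s : String) :
    uniqueLetterString s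
      = (upList.map (fun c => ulsF (occI s.toList c) (s.toList.length : Int))).sum := by
  unfold uniqueLetterString
  simp only [List.length_map]
  set cs := s.toList with hcs
  set sl := cs.map (fun a => (a.toNat : Int) - 65) with hsl
  set n : Int := (cs.length : Int) with hn
  -- rewrite the outer range as a map over Nat range
  rw [PySem.List.pyRange_one 0 26]
  simp only [Int.sub_zero]
  rw [show Int.toNat 26 = 26 from rfl]
  rw [List.foldl_map]
  -- rewrite each body
  rw [PySem.List.foldl_congr_mem (List.range 26) _
      (fun res k => res + ulsF (occI cs (Char.ofNat (k + 65))) n) 0 ?_]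
  · rw [PySem.List.foldl_add]
    rw [upList, List.map_map]
    norm_num
    rfl
  · intro res k hk
    have hk26 : k < 26 := List.mem_range.mp hk
    simp only [zero_add]
    have hinner :
        (PySem.List.pyRange 0 n 1).foldl
            (fun st j => if PySem.List.pyGetD sl j 0 = (k : Int) then ulsStep st j else st)
            (res, -1, -1)
          = ((PySem.List.pyRange 0 n 1).filter
              (fun j => decide (PySem.List.pyGetD sl j 0 = (k : Int)))).foldl
              ulsStep (res, -1, -1) := by
      rw [List.foldl_filter]
      simp
    rw [hinner, occI_eq_filter cs k hk26, ulsStep_add]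
    show _ + _ = res + ulsF (occI cs (Char.ofNat (k + 65))) n
    rw [ulsF, ulsRes, ulsTail, ulsPP]
    ring

lemma B_eq_sum (s : String) :
    uniqueLetterString_alt s
      = (upList.map (fun c => ulsF (occI s.toList c) (s.toList.length : Int))).sum := by
  unfold uniqueLetterString_alt
  set cs := s.toList with hcs
  set n : Int := (cs.length : Int) with hn
  obtain ⟨ihr, ihd, ihn, ihk⟩ := B_inv cs
  set st := (PySem.List.enumerate cs 0).foldl ulsStepB (0, PySem.Dict.empty) with hst
  rw [PySem.List.foldl_add st.2.values (fun pr => (pr.2 - pr.1) * (n - pr.2)) st.1]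
  rw [PySem.Dict.values_eq_map_keys st.2 ihn (-1, -1), List.map_map]
  have hkeys : st.2.keys.map ((fun pr => (pr.2 - pr.1) * (n - pr.2)) ∘ fun k => st.2.getD k (-1, -1))
      = st.2.keys.map (fun c => ulsTail (occI cs c) n) := by
    apply List.map_congr_left
    intro c hc
    have hup := ((ihk c).mp hc).1
    simp only [Function.comp_apply]
    rw [ihd c hup, ulsTail]
  rw [hkeys]
  rw [sum_map_subset st.2.keys upList (fun c => ulsTail (occI cs c) n) ihn nodup_upList
      (fun c hc => (mem_upList_iff c).mpr ((ihk c).mp hc).1)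
      ?_]
  · rw [ihr, ← PySem.List.sum_map_add_int upList (fun c => ulsRes (occI cs c))
        (fun c => ulsTail (occI cs c) n)]
    apply congrArg
    apply List.map_congr_left
    intro c _
    rw [ulsF]
  · intro c hc hnc
    have hup := (mem_upList_iff c).mp hc
    have hcm : c ∉ cs := fun h => hnc ((ihk c).mpr ⟨hup, h⟩)
    show ulsTail (occI cs c) n = 0
    rw [occI_of_not_mem cs c hcm, ulsTail, ulsPP_nil]
    ring

-- ===== VERDICT (by name: the statement is the Claim_ definition above) =====
theorem uniqueLetterString_spec : Claim_equal_uniqueLetterString := by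
  intro s _
  unfold Spec_uniqueLetterString
  rw [A_eq_sum, B_eq_sum]
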